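-- pv_equiv track=rewrite | github.com/RUSLANBALTABAEV/Programming_tasks-Abramov---Programming-tasks- | CHAPTER_1-BASIC_PROGRAMMING_TECHNIQUES/Nested loops/356.py | find_first_last
-- ===== SOURCE A (Python) =====
-- def find_first_last(points):
--     """Для каждого цвета возвращает словарь: цвет -> (first_index, last_index) (индексы с 0)."""
--     first = {}
--     last = {}
--     for i, (x, y, c) in enumerate(points):
--         if c not in first:
--             first[c] = i
--         last[c] = i
--     # Объединяем
--     result = {}
--     for c in first:
--         result[c] = (first[c], last[c])
--     return result
-- ===== SOURCE B (Python) =====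
-- def find_first_last(points):
--     """Per distinct color, locate first/last index by direct list searches:
--     first = colors.index(c), last = n - 1 - reversed(colors).index(c)."""
--     colors = [c for (_, _, c) in points]
--     rev = colors[::-1]
--     n = len(colors)
--     result = {}
--     for c in colors:
--         if c not in result:
--             result[c] = (colors.index(c), n - 1 - rev.index(c))
--     return result
-- ===== Notes on version B (the rewrite author's own statement) =====
-- stated objective: alternative
-- what changed: Instead of accumulating first/last indices in two dicts during one enumerate pass and then merging, B extracts the color list and, for each distinct color in first-seen order, computes the first index by a forward colors.index search and the last index from a search in the reversed list (n-1-rev.index(c)).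
import Mathlib
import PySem

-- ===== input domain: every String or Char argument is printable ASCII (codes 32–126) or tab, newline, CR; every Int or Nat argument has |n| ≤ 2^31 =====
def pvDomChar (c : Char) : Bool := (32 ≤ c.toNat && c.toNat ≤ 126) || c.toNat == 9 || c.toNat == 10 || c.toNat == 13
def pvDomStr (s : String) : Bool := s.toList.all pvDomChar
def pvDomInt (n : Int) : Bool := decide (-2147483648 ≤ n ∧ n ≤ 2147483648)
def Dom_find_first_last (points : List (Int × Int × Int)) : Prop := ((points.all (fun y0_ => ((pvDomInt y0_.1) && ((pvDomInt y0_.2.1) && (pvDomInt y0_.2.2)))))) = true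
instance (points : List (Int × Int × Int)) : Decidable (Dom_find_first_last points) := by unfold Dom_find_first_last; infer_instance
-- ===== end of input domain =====

-- B replaces A's dict accumulation (two dicts filled during one enumerate pass, then a
-- merge loop) by per-color index searches: for each distinct color, first = colors.index(c)
-- and last = n - 1 - reversed(colors).index(c); objective: alternative (no accumulated
-- index state, direct searches instead).

-- ===== PORT A =====
-- two dicts first/last filled in one enumerate loop, then a merge loop over first's keys
def find_first_last (points : List (Int × Int × Int)) : List (Int × Int × Int) :=
  let fl := (PySem.List.enumerate points).foldl
      (fun (p : PySem.Dict Int Int × PySem.Dict Int Int) ic =>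
        let i := ic.1
        let c := ic.2.2.2
        let first := if p.1.contains c then p.1 else p.1.insert c i
        (first, p.2.insert c i))
      (PySem.Dict.empty, PySem.Dict.empty)
  -- first[c] / last[c] ported as getD _ 0: every key of first is in both dicts, so no KeyError
  let result := fl.1.keys.foldl
      (fun (r : PySem.Dict Int (Int × Int)) c => r.insert c (fl.1.getD c 0, fl.2.getD c 0))
      PySem.Dict.empty
  result.items

-- ===== PORT B =====
def find_first_last_alt (points : List (Int × Int × Int)) : List (Int × Int × Int) :=
  let colors := points.map (fun p => p.2.2)
  -- colors[::-1]; step -1 ≠ 0 so slice? is always some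
  let rev := (PySem.List.slice? colors none none (-1)).getD []
  let n : Int := (colors.length : Int)
  -- colors.index(c) / rev.index(c): ported as getD 0 — c is drawn from colors, so both
  -- searches succeed and Python's ValueError is unreachable
  (colors.foldl
      (fun (r : PySem.Dict Int (Int × Int)) c =>
        if r.contains c then r
        else r.insert c ((((PySem.List.index? colors c).getD 0 : Nat) : Int),
                         n - 1 - (((PySem.List.index? rev c).getD 0 : Nat) : Int)))
      PySem.Dict.empty).items

-- ===== PRECONDITION & SPEC =====
def Spec_find_first_last (points : List (Int × Int × Int)) (out : List (Int × Int × Int)) : Prop := out = find_first_last_alt points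
instance (points : List (Int × Int × Int)) (out : List (Int × Int × Int)) : Decidable (Spec_find_first_last points out) := by unfold Spec_find_first_last; infer_instance

-- ===== CLAIM (what is proved, stated in full; the proofs are below) =====
def Claim_equal_find_first_last : Prop := ∀ (points : List (Int × Int × Int)), Dom_find_first_last points → Spec_find_first_last points (find_first_last points)

-- ===== LEMMAS AND PROOFS =====

-- A's loop step (proof-side abbreviation)
def pvStepA (p : PySem.Dict Int Int × PySem.Dict Int Int) (ic : Int × (Int × Int × Int)) :
    PySem.Dict Int Int × PySem.Dict Int Int :=
  let i := ic.1
  let c := ic.2.2.2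
  let first := if p.1.contains c then p.1 else p.1.insert c i
  (first, p.2.insert c i)

-- the pair B stores for color c
def pvG (colors : List Int) (c : Int) : Int × Int :=
  ((((PySem.List.index? colors c).getD 0 : Nat) : Int),
   (colors.length : Int) - 1 - (((PySem.List.index? colors.reverse c).getD 0 : Nat) : Int))

-- B's loop step (proof-side abbreviation)
def pvStepB (colors : List Int) (r : PySem.Dict Int (Int × Int)) (c : Int) :
    PySem.Dict Int (Int × Int) :=
  if r.contains c then r else r.insert c (pvG colors c)

-- last index of c in l, recursively
def pvLast? (l : List Int) (c : Int) : Option Nat :=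
  match l with
  | [] => none
  | a :: t =>
    match pvLast? t c with
    | some k => some (k + 1)
    | none => if a = c then some 0 else none

theorem pvLast?_eq_none {l : List Int} {c : Int} : pvLast? l c = none ↔ c ∉ l := by
  induction l with
  | nil => simp [pvLast?]
  | cons a t ih =>
    simp only [pvLast?, List.mem_cons]
    cases h : pvLast? t c with
    | some k =>
      have hct : c ∈ t := by by_contra hm; simp [ih.mpr hm] at h
      simp [hct]
    | none =>
      have hct := ih.mp h
      by_cases hac : a = c
      · simp [hac, hct]
      · constructor
        · intro _
          simp only [not_or]
          exact ⟨fun h' => hac h'.symm, hct⟩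
        · intro _
          simp [hac]

-- pvLast? is index-in-reverse, flipped
theorem pvLast?_reverse (l : List Int) (c : Int) :
    pvLast? l c = (PySem.List.index? l.reverse c).map (fun k => l.length - 1 - k) := by
  induction l with
  | nil => simp [pvLast?, PySem.List.index?]
  | cons a t ih =>
    by_cases hct : c ∈ t
    · have hmem : c ∈ t.reverse := by simpa using hct
      obtain ⟨k', hk'⟩ := Option.isSome_iff_exists.mp ((PySem.List.index?_isSome_iff _ _).mpr hmem)
      obtain ⟨hlt, -, -⟩ := PySem.List.getElem_of_index?_eq_some hk'
      rw [List.length_reverse] at hlt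
      have hstep : pvLast? (a :: t) c
          = match pvLast? t c with
            | some k => some (k + 1)
            | none => if a = c then some 0 else none := rfl
      rw [hstep, ih, List.reverse_cons, PySem.List.index?_append_of_mem _ hmem, hk']
      simp only [Option.map_some]
      congr 1
      simp only [List.length_cons]
      omega
    · have hnone : pvLast? t c = none := pvLast?_eq_none.mpr hct
      have hmem : c ∉ t.reverse := by simpa using hct
      have hstep : pvLast? (a :: t) c
          = match pvLast? t c with
            | some k => some (k + 1)
            | none => if a = c then some 0 else none := rfl
      rw [hstep, hnone, List.reverse_cons]
      by_cases hac : a = c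
      · subst hac
        rw [PySem.List.index?_append_singleton_self t.reverse a hmem]
        simp
      · have : c ∉ t.reverse ++ [a] := by
          simp only [List.mem_append, List.mem_singleton]
          rintro (h1 | h2)
          · exact hmem h1
          · exact hac h2.symm
        rw [(PySem.List.index?_eq_none_iff _ _).mpr this]
        simp [hac]

theorem pvJoint (colors : List Int) (l : List (Int × (Int × Int × Int)))
    (first last_ : PySem.Dict Int Int) (r : PySem.Dict Int (Int × Int))
    (h : r.items = first.keys.map (fun c => (c, pvG colors c))) :
    (l.foldl (fun r ic => pvStepB colors r ic.2.2.2) r).items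
      = ((l.foldl pvStepA (first, last_)).1).keys.map (fun c => (c, pvG colors c)) := by
  induction l generalizing first last_ r with
  | nil => simpa using h
  | cons ic tl ih =>
    simp only [List.foldl_cons]
    have hk : r.keys = first.keys := by
      simp only [PySem.Dict.keys, h, List.map_map]
      simp
    have hcont : r.contains ic.2.2.2 = first.contains ic.2.2.2 := by
      rw [PySem.Dict.contains_eq_decide_mem_keys, PySem.Dict.contains_eq_decide_mem_keys, hk]
    by_cases hc : first.contains ic.2.2.2 = true
    · have hrc : r.contains ic.2.2.2 = true := by rw [hcont]; exact hc
      have hA : pvStepA (first, last_) ic = (first, last_.insert ic.2.2.2 ic.1) := by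
        simp [pvStepA, hc]
      have hB : pvStepB colors r ic.2.2.2 = r := by simp [pvStepB, hrc]
      rw [hA, hB]
      exact ih first (last_.insert ic.2.2.2 ic.1) r h
    · have hc' : first.contains ic.2.2.2 = false := by simpa using hc
      have hrc : r.contains ic.2.2.2 = false := by rw [hcont]; exact hc'
      have hA : pvStepA (first, last_) ic
          = (first.insert ic.2.2.2 ic.1, last_.insert ic.2.2.2 ic.1) := by
        simp [pvStepA, hc']
      have hB : pvStepB colors r ic.2.2.2 = r.insert ic.2.2.2 (pvG colors ic.2.2.2) := by
        simp [pvStepB, hrc]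
      rw [hA, hB]
      refine ih _ _ _ ?_
      rw [PySem.Dict.items_insert_of_not_contains _ _ hrc,
          PySem.Dict.keys_insert_of_not_contains _ _ hc', h, List.map_append]
      rfl

theorem pvFoldA_getD (pts : List (Int × Int × Int)) (s : Int)
    (first last_ : PySem.Dict Int Int) (c d : Int) :
    ((PySem.List.enumerate pts s).foldl pvStepA (first, last_)).1.getD c d
      = (if first.contains c then first.getD c d
         else match PySem.List.index? (pts.map (fun p => p.2.2)) c with
              | some k => s + (k : Int)
              | none => d)
    ∧ ((PySem.List.enumerate pts s).foldl pvStepA (first, last_)).2.getD c d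
      = (match pvLast? (pts.map (fun p => p.2.2)) c with
         | some k => s + (k : Int)
         | none => last_.getD c d) := by
  induction pts generalizing s first last_ with
  | nil =>
    constructor
    · by_cases hc : first.contains c = true
      · simp [PySem.List.enumerate, hc]
      · simp [PySem.List.enumerate, hc,
              PySem.Dict.getD_of_not_contains first d (by simpa using hc),
              PySem.List.index?]
    · simp [PySem.List.enumerate, pvLast?]
  | cons p t ih =>
    obtain ⟨x, y, c0⟩ := p
    rw [PySem.List.enumerate_cons, List.foldl_cons]
    by_cases h0 : first.contains c0 = true
    · have hA : pvStepA (first, last_) (s, (x, y, c0)) = (first, last_.insert c0 s) := by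
        simp [pvStepA, h0]
      rw [hA]
      have IH := ih (s + 1) first (last_.insert c0 s)
      constructor
      · rw [IH.1]
        by_cases hcc : first.contains c = true
        · simp [hcc]
        · have hne : c0 ≠ c := by intro h; rw [h] at h0; exact hcc h0
          rw [if_neg hcc, if_neg hcc, List.map_cons,
              PySem.List.index?_cons_of_ne _ hne]
          cases hidx : PySem.List.index? (t.map (fun p => p.2.2)) c with
          | some k => simp only [Option.map_some]; push_cast; ring
          | none => simp
      · rw [IH.2]
        cases hl : pvLast? (t.map (fun p => p.2.2)) c with
        | some k =>
          have : pvLast? ((c0 :: t.map (fun p => p.2.2) : List Int)) c = some (k + 1) := by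
            simp [pvLast?, hl]
          simp only [List.map_cons, this]
          push_cast; ring
        | none =>
          simp only [List.map_cons]
          by_cases hc : c = c0
          · subst hc
            have : pvLast? ((c :: t.map (fun p => p.2.2) : List Int)) c = some 0 := by
              simp [pvLast?, hl]
            simp [this]
          · have : pvLast? ((c0 :: t.map (fun p => p.2.2) : List Int)) c = none := by
              simp [pvLast?, hl]; intro h; exact absurd h.symm hc
            simp [this, PySem.Dict.getD_insert, hc]
    · have hA : pvStepA (first, last_) (s, (x, y, c0))
          = (first.insert c0 s, last_.insert c0 s) := by
        simp [pvStepA, h0]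
      rw [hA]
      have IH := ih (s + 1) (first.insert c0 s) (last_.insert c0 s)
      constructor
      · rw [IH.1]
        by_cases hc : c = c0
        · subst hc
          rw [List.map_cons, PySem.List.index?_cons_self]
          simp [h0]
        · have hcont : (first.insert c0 s).contains c = first.contains c := by
            simp [PySem.Dict.contains_insert, hc]
          have hgd : (first.insert c0 s).getD c d = first.getD c d := by
            simp [PySem.Dict.getD_insert, hc]
          rw [hcont, hgd, List.map_cons,
              PySem.List.index?_cons_of_ne _ (fun h => hc h.symm)]
          by_cases hcc : first.contains c = true
          · simp [hcc]
          · rw [if_neg hcc, if_neg hcc]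
            cases hidx : PySem.List.index? (t.map (fun p => p.2.2)) c with
            | some k => simp only [Option.map_some]; push_cast; ring
            | none => simp
      · rw [IH.2]
        cases hl : pvLast? (t.map (fun p => p.2.2)) c with
        | some k =>
          have : pvLast? ((c0 :: t.map (fun p => p.2.2) : List Int)) c = some (k + 1) := by
            simp [pvLast?, hl]
          simp only [List.map_cons, this]
          push_cast; ring
        | none =>
          simp only [List.map_cons]
          by_cases hc : c = c0
          · subst hc
            have : pvLast? ((c :: t.map (fun p => p.2.2) : List Int)) c = some 0 := by
              simp [pvLast?, hl]
            simp [this]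
          · have : pvLast? ((c0 :: t.map (fun p => p.2.2) : List Int)) c = none := by
              simp [pvLast?, hl]; intro h; exact absurd h.symm hc
            simp [this, PySem.Dict.getD_insert, hc]

theorem pvKeysSub (l : List (Int × (Int × Int × Int))) (first last_ : PySem.Dict Int Int)
    (c : Int) (hc : c ∈ (l.foldl pvStepA (first, last_)).1.keys) :
    c ∈ first.keys ∨ c ∈ l.map (fun ic => ic.2.2.2) := by
  induction l generalizing first last_ with
  | nil => exact Or.inl hc
  | cons ic tl ih =>
    rw [List.foldl_cons] at hc
    rcases ih (pvStepA (first, last_) ic).1 (pvStepA (first, last_) ic).2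
        (by simpa using hc) with h1 | h2
    · simp only [pvStepA] at h1
      by_cases h0 : first.contains ic.2.2.2 = true
      · rw [if_pos h0] at h1
        exact Or.inl h1
      · rw [if_neg h0] at h1
        rcases (PySem.Dict.mem_keys_insert _ _ _ _).mp h1 with h | h
        · exact Or.inr (by simp [h])
        · exact Or.inl h
    · exact Or.inr (by simp; right; simpa using h2)

-- A's final state keeps keys unique
theorem pvNodupA (l : List (Int × (Int × Int × Int))) (first last_ : PySem.Dict Int Int)
    (hnd : first.keys.Nodup) : (l.foldl pvStepA (first, last_)).1.keys.Nodup := by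
  induction l generalizing first last_ with
  | nil => exact hnd
  | cons ic tl ih =>
    simp only [List.foldl_cons]
    have hnd' : (pvStepA (first, last_) ic).1.keys.Nodup := by
      simp only [pvStepA]
      split
      · exact hnd
      · exact PySem.Dict.nodup_keys_insert _ _ _ hnd
    have := ih (pvStepA (first, last_) ic).1 (pvStepA (first, last_) ic).2 hnd'
    simpa using this

-- ===== VERDICT (by name: the statement is the Claim_ definition above) =====
theorem find_first_last_spec : Claim_equal_find_first_last := by
  intro points _
  unfold Spec_find_first_last
  -- B's side: rev is colors.reverse, and the loop is pvStepB
  have halt : find_first_last_alt points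
      = ((points.map (fun p => p.2.2)).foldl
          (pvStepB (points.map (fun p => p.2.2))) PySem.Dict.empty).items := by
    unfold find_first_last_alt
    simp only [PySem.List.slice?_none_none_neg_one, Option.getD_some]
    rfl
  rw [halt]
  unfold find_first_last
  set colors := points.map (fun p => p.2.2) with hcolors
  set l := PySem.List.enumerate points with hl
  set fl := l.foldl pvStepA (PySem.Dict.empty, PySem.Dict.empty) with hfl
  have hfoldA : l.foldl
      (fun (p : PySem.Dict Int Int × PySem.Dict Int Int) ic =>
        let i := ic.1
        let c := ic.2.2.2
        let first := if p.1.contains c then p.1 else p.1.insert c i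
        (first, p.2.insert c i)) (PySem.Dict.empty, PySem.Dict.empty) = fl := rfl
  simp only [hfoldA]
  have hnd0 : (PySem.Dict.empty : PySem.Dict Int Int).keys.Nodup := PySem.Dict.nodup_keys_empty
  have hndA : fl.1.keys.Nodup := pvNodupA l PySem.Dict.empty PySem.Dict.empty hnd0
  -- A's merge loop over first's (distinct, fresh) keys appends one item per key
  have hfresh : ∀ c ∈ fl.1.keys, (PySem.Dict.empty : PySem.Dict Int (Int × Int)).contains c = false := by
    intro c _; exact PySem.Dict.contains_empty c
  have hA := PySem.Dict.items_foldl_insert_fresh (l := fl.1.keys)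
      (k := fun c => c) (v := fun c => (fl.1.getD c 0, fl.2.getD c 0))
      (d := PySem.Dict.empty) hfresh (by simpa using hndA)
  rw [hA]
  -- B's loop over colors is A's loop list mapped to its colors
  have hcol : l.map (fun ic => ic.2.2.2) = colors := by
    have h2 := PySem.List.map_snd_enumerate points (0 : Int)
    calc l.map (fun ic => ic.2.2.2)
        = (l.map (fun ic => ic.2)).map (fun p => p.2.2) := by rw [List.map_map]; rfl
      _ = colors := by rw [hl, h2]
  have hB2 : (colors.foldl (pvStepB colors) PySem.Dict.empty).items
      = fl.1.keys.map (fun c => (c, pvG colors c)) := by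
    rw [hfl, ← hcol, List.foldl_map]
    exact pvJoint _ l PySem.Dict.empty PySem.Dict.empty PySem.Dict.empty rfl
  rw [hB2]
  simp only [show (PySem.Dict.empty : PySem.Dict Int (Int × Int)).items
      = ([] : List (Int × (Int × Int))) from rfl, List.nil_append]
  -- values agree key by key
  apply List.map_congr_left
  intro c hc
  have hmemcol : c ∈ colors := by
    rcases pvKeysSub l PySem.Dict.empty PySem.Dict.empty c (hfl ▸ hc) with h | h
    · simp [PySem.Dict.keys_empty] at h
    · rw [hcol] at h; exact h
  obtain ⟨k, hk⟩ := Option.isSome_iff_exists.mp ((PySem.List.index?_isSome_iff _ _).mpr hmemcol)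
  have hlast : ∃ m, pvLast? colors c = some m := by
    cases hm : pvLast? colors c with
    | some m => exact ⟨m, rfl⟩
    | none => exact absurd hmemcol (pvLast?_eq_none.mp hm)
  obtain ⟨m, hm⟩ := hlast
  obtain ⟨k', hk', hmEq⟩ : ∃ k', PySem.List.index? colors.reverse c = some k' ∧ m = colors.length - 1 - k' := by
    have := pvLast?_reverse colors c
    rw [hm] at this
    cases hrev : PySem.List.index? colors.reverse c with
    | some k' => rw [hrev] at this; exact ⟨k', rfl, by simpa using this⟩
    | none => rw [hrev] at this; simp at this
  obtain ⟨hk'lt, -, -⟩ := PySem.List.getElem_of_index?_eq_some hk'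
  rw [List.length_reverse] at hk'lt
  have hgd := pvFoldA_getD points 0 PySem.Dict.empty PySem.Dict.empty c 0
  rw [← hcolors] at hgd
  have hgd1 : fl.1.getD c 0 = (k : Int) := by
    rw [hfl, hl]
    rw [hgd.1, if_neg (by simp [PySem.Dict.contains_empty]), hk]
    simp
  have hgd2 : fl.2.getD c 0 = (m : Int) := by
    rw [hfl, hl]
    rw [hgd.2, hm]
    simp
  show (c, (fl.1.getD c 0, fl.2.getD c 0)) = (c, pvG colors c)
  rw [hgd1, hgd2]
  unfold pvG
  rw [hk, hk']
  simp only [Option.getD_some]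
  have hmi : (m : Int) = (colors.length : Int) - 1 - (k' : Int) := by omega
  rw [hmi]
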